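-- pv_equiv track=rewrite | github.com/wangcq714/SpyTestTool | signaltest/modules/buildVariable.py | calc_signaVal
-- ===== SOURCE A (Python) =====
-- def calc_signaVal(signalVal, startByte, startBit, signalLen, byteorder) -> list:
-- 	signalData = [0, 0, 0, 0, 0, 0, 0, 0]
-- 	for i in range(int(signalLen)):
-- 		if int(byteorder) == 0:
-- 			signalData[int(startByte) - (int(startBit) + i)//8] |= (((int(signalVal, 16) >> i) & 0x01) << ((int(startBit) + i) % 8))
-- 		elif int(byteorder) == 1:
-- 			signalData[int(startByte) + (int(startBit) + i)//8] |= (((int(signalVal, 16) >> i) & 0x01) << ((int(startBit) + i) % 8))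
-- 	retData = [hex(x) for x in signalData]
--
-- 	return retData
-- ===== SOURCE B (Python) =====
-- def calc_signaVal(signalVal, startByte, startBit, signalLen, byteorder):
--     n = int(signalLen)
--     data = [0] * 8
--     if n > 0 and int(byteorder) in (0, 1):
--         # parse once, keep only the low n bits, shift the whole field into place
--         val = int(signalVal, 16) & ((1 << n) - 1)
--         if int(byteorder) == 1:
--             big = val << (8 * int(startByte) + int(startBit))
--             data = [(big >> (8 * k)) & 0xFF for k in range(8)]
--         else:
--             big = val << (8 * (7 - int(startByte)) + int(startBit))
--             data = [(big >> (8 * (7 - k))) & 0xFF for k in range(8)]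
--     return [hex(x) for x in data]
-- ===== Notes on version B (the rewrite author's own statement) =====
-- stated objective: faster
-- what changed: B parses the hex string once, masks it to signalLen bits and shifts the whole value into bit position with a single shift, extracting the 8 bytes by per-byte shift/mask, instead of A's loop that re-parses the string and places one bit per iteration.
import Mathlib
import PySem

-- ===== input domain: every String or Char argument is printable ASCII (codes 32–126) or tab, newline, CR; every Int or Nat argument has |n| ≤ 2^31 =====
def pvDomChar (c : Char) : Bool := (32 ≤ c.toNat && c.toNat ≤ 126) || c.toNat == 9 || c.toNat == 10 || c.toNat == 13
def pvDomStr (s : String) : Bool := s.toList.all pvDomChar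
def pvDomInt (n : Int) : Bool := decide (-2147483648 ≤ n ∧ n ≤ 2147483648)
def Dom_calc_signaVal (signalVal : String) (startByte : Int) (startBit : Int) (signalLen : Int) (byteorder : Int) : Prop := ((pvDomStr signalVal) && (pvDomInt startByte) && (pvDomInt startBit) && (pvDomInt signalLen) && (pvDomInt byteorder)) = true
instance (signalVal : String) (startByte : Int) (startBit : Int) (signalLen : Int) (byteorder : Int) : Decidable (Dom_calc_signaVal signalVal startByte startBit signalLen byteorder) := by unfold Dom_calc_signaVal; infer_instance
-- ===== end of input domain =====

-- B parses the hex string ONCE, masks it to signalLen bits and shifts the whole field into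
-- position, extracting the 8 bytes by shift/mask, instead of A's re-parsing the string and
-- placing one bit per loop iteration (objective: faster, constant-factor).

-- ===== PORT A =====
-- hex(x) for an Int (Python's builtin hex; used by both ports' final list comprehension)
def pyHexDigit (n : Nat) : Char := if n < 10 then Char.ofNat (48 + n) else Char.ofNat (87 + n)

def pyHexDigits (n : Nat) : List Char :=
  if h : n = 0 then [] else pyHexDigits (n / 16) ++ [pyHexDigit (n % 16)]
decreasing_by exact Nat.div_lt_self (Nat.pos_of_ne_zero h) (by norm_num)

def pyHex (x : Int) : String :=
  (if x < 0 then "-0x" else "0x") ++ String.ofList (if x.natAbs = 0 then ['0'] else pyHexDigits x.natAbs)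

-- literal transliteration of A: fold over range(int(signalLen)); int(signalVal, 16) is
-- (ofStrBase? signalVal 16).getD 0, exact under Pre_ (Pre_ demands the parse succeeds whenever
-- the loop body runs); i ≥ 0 and (startBit+i) % 8 ≥ 0, so their .toNat (shift counts) are exact.
def calc_signaVal (signalVal : String) (startByte : Int) (startBit : Int) (signalLen : Int) (byteorder : Int) : List String :=
  let signalData : List Int := [0, 0, 0, 0, 0, 0, 0, 0]
  let signalData := (PySem.List.pyRange 0 signalLen 1).foldl (fun data i =>
    if byteorder = 0 then
      let idx := startByte - PySem.Int.floordiv (startBit + i) 8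
      PySem.List.pySetD data idx (PySem.Int.bor (PySem.List.pyGetD data idx 0)
        ((PySem.Int.band (((PySem.Int.ofStrBase? signalVal 16).getD 0) >>> i.toNat) 1) <<< (PySem.Int.mod (startBit + i) 8).toNat))
    else if byteorder = 1 then
      let idx := startByte + PySem.Int.floordiv (startBit + i) 8
      PySem.List.pySetD data idx (PySem.Int.bor (PySem.List.pyGetD data idx 0)
        ((PySem.Int.band (((PySem.Int.ofStrBase? signalVal 16).getD 0) >>> i.toNat) 1) <<< (PySem.Int.mod (startBit + i) 8).toNat))
    else data) signalData
  signalData.map pyHex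

-- ===== PORT B =====
-- literal transliteration of Source B; the shift amounts are ≥ 0 under Pre_, so .toNat is exact there.
def calc_signaVal_alt (signalVal : String) (startByte : Int) (startBit : Int) (signalLen : Int) (byteorder : Int) : List String :=
  let data : List Int := List.replicate 8 0
  let data :=
    if 0 < signalLen ∧ (byteorder = 0 ∨ byteorder = 1) then
      let val := PySem.Int.band ((PySem.Int.ofStrBase? signalVal 16).getD 0) (((1 : Int) <<< signalLen.toNat) - 1)
      if byteorder = 1 then
        let big := val <<< (8 * startByte + startBit).toNat
        (List.range 8).map (fun (k : Nat) => PySem.Int.band (big >>> (8 * k)) 255)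
      else
        let big := val <<< (8 * (7 - startByte) + startBit).toNat
        (List.range 8).map (fun (k : Nat) => PySem.Int.band (big >>> (8 * (7 - k))) 255)
    else data
  data.map pyHex

-- ===== PRECONDITION & SPEC =====
-- Pre_ excludes, when the bit loop actually runs (signalLen > 0 and byteorder in {0,1}):
-- non-hex signalVal, on which A raises ValueError; and inputs whose byte index leaves [0,7]:
-- for indices ≥ 8 A raises IndexError, and for negative indices A silently wraps bits into the
-- opposite end of the 8-byte array (Python negative indexing, an accident of A's implementation),
-- where B's single shift either raises (negative shift) or drops the out-of-frame bits.
def Pre_calc_signaVal (signalVal : String) (startByte : Int) (startBit : Int) (signalLen : Int) (byteorder : Int) : Prop :=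
  (0 < signalLen ∧ (byteorder = 0 ∨ byteorder = 1)) →
    ((PySem.Int.ofStrBase? signalVal 16).isSome = true ∧
     (if byteorder = 1 then
        0 ≤ startByte + PySem.Int.floordiv startBit 8 ∧
        startByte + PySem.Int.floordiv (startBit + signalLen - 1) 8 ≤ 7
      else
        0 ≤ startByte - PySem.Int.floordiv (startBit + signalLen - 1) 8 ∧
        startByte - PySem.Int.floordiv startBit 8 ≤ 7))
instance (signalVal : String) (startByte : Int) (startBit : Int) (signalLen : Int) (byteorder : Int) : Decidable (Pre_calc_signaVal signalVal startByte startBit signalLen byteorder) := by unfold Pre_calc_signaVal; infer_instance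

def pvWitness_calc_signaVal : String × Int × Int × Int × Int := ("ff", 1, 4, 8, 1)

def Spec_calc_signaVal (signalVal : String) (startByte : Int) (startBit : Int) (signalLen : Int) (byteorder : Int) (out : List String) : Prop := out = calc_signaVal_alt signalVal startByte startBit signalLen byteorder
instance (signalVal : String) (startByte : Int) (startBit : Int) (signalLen : Int) (byteorder : Int) (out : List String) : Decidable (Spec_calc_signaVal signalVal startByte startBit signalLen byteorder out) := by unfold Spec_calc_signaVal; infer_instance

-- ===== CLAIM (what is proved, stated in full; the proofs are below) =====
def Claim_equal_calc_signaVal : Prop := ∀ (signalVal : String) (startByte : Int) (startBit : Int) (signalLen : Int) (byteorder : Int), Dom_calc_signaVal signalVal startByte startBit signalLen byteorder → Pre_calc_signaVal signalVal startByte startBit signalLen byteorder → Spec_calc_signaVal signalVal startByte startBit signalLen byteorder (calc_signaVal signalVal startByte startBit signalLen byteorder)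

-- ===== LEMMAS AND PROOFS =====

-- the list index holding the byte at absolute byte position k (byteorder 1: identity; 0: mirrored)
def pvPhi (flip : Bool) (k : Nat) : Nat := if flip then 7 - k else k

-- value of list slot k after the first m bits have been placed, where s is the absolute bit
-- position of bit 0 of the signal
def pvByte (v : Int) (s : Nat) (flip : Bool) (m : Nat) (k : Nat) : Int :=
  ((v % 2 ^ m) * 2 ^ s) / 2 ^ (8 * pvPhi flip k) % 256

-- canonical form of one iteration of A's loop
def pvStep (v : Int) (s : Nat) (flip : Bool) (data : List Int) (i : Nat) : List Int :=
  data.set (pvPhi flip ((s + i) / 8))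
    (PySem.Int.bor (data.getD (pvPhi flip ((s + i) / 8)) 0) (((v / 2 ^ i) % 2) * 2 ^ ((s + i) % 8)))

set_option maxRecDepth 4096 in
theorem pv_band_two_pow_sub_one (a : Int) (k : Nat) :
    PySem.Int.band a (2 ^ k - 1) = a % 2 ^ k := by
  have hc : ((2 ^ k : Nat) : Int) = 2 ^ k := by push_cast; ring
  have h2 : (0:Int) < 2 ^ k := by positivity
  have hbt : ((2:Int) ^ k - 1).toNat = 2 ^ k - 1 := by omega
  unfold PySem.Int.band
  by_cases ha : 0 ≤ a
  · rw [if_pos ha, if_pos (by omega : (0:Int) ≤ 2 ^ k - 1), hbt]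
    lift a to Nat using ha with m
    rw [Int.toNat_natCast, Nat.and_two_pow_sub_one_eq_mod]
    push_cast
    ring
  · rw [if_neg ha, if_pos (by omega : (0:Int) ≤ 2 ^ k - 1), hbt]
    set m : Nat := (-a - 1).toNat with hm
    have ham : a = -(m : Int) - 1 := by omega
    rw [Nat.and_comm, Nat.and_two_pow_sub_one_eq_mod]
    have hmlt : m % 2 ^ k < 2 ^ k := Nat.mod_lt _ (by positivity)
    have hdm : ((m % 2 ^ k : Nat) : Int) + 2 ^ k * ((m / 2 ^ k : Nat) : Int) = (m : Int) := by
      exact_mod_cast Nat.mod_add_div m (2 ^ k)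
    have hmod : a % 2 ^ k = 2 ^ k - 1 - ((m % 2 ^ k : Nat) : Int) := by
      calc a % 2 ^ k
          = ((2 ^ k - 1 - ((m % 2 ^ k : Nat) : Int)) + 2 ^ k * (-((m / 2 ^ k : Nat) : Int) - 1)) % 2 ^ k := by
            congr 1
            rw [ham]
            linear_combination hdm
        _ = (2 ^ k - 1 - ((m % 2 ^ k : Nat) : Int)) % 2 ^ k := Int.add_mul_emod_self_left _ _ _
        _ = 2 ^ k - 1 - ((m % 2 ^ k : Nat) : Int) := Int.emod_eq_of_lt (by omega) (by omega)
    rw [hmod]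
    omega

theorem pv_band_one (a : Int) : PySem.Int.band a 1 = a % 2 := by
  have h := pv_band_two_pow_sub_one a 1
  norm_num at h
  exact h

theorem pv_band_255 (a : Int) : PySem.Int.band a 255 = a % 256 := by
  have h := pv_band_two_pow_sub_one a 8
  norm_num at h
  exact h

theorem pv_emod_succ_pow (v : Int) (m : Nat) :
    v % 2 ^ (m + 1) = v % 2 ^ m + (v / 2 ^ m % 2) * 2 ^ m := by
  have h2m : (0:Int) < 2 ^ m := by positivity
  have h1 : v / 2 ^ m / 2 = v / 2 ^ (m + 1) := by
    rw [Int.ediv_ediv_of_nonneg (le_of_lt h2m), ← pow_succ]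
  rw [Int.emod_def v (2 ^ (m + 1)), Int.emod_def v (2 ^ m),
    Int.emod_def (v / 2 ^ m) 2, ← h1, pow_succ]
  ring

theorem pv_bor_lt {a b : Int} (r : Nat) (ha : 0 ≤ a) (har : a < 2 ^ r)
    (hb : b = 0 ∨ b = 1) : PySem.Int.bor a (b * 2 ^ r) = a + b * 2 ^ r := by
  have hc : ((2 ^ r : Nat) : Int) = 2 ^ r := by push_cast; ring
  rcases hb with rfl | rfl
  · simp only [zero_mul, add_zero]
    unfold PySem.Int.bor
    rw [if_pos ha, if_pos le_rfl]
    simp [Int.toNat_of_nonneg ha]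
  · rw [one_mul]
    conv_lhs => rw [← Int.toNat_of_nonneg ha, ← hc]
    rw [PySem.Int.bor_natCast]
    have hlt : a.toNat < 2 ^ r := by omega
    have key := Nat.two_pow_add_eq_or_of_lt hlt 1
    simp only [mul_one] at key
    rw [Nat.lor_comm, ← key]
    push_cast
    omega

theorem pv_step_formula (v : Int) (s m : Nat) (flip : Bool) (h : s + m + 1 ≤ 64) :
    pvStep v s flip ((List.range 8).map (pvByte v s flip m)) m
      = (List.range 8).map (pvByte v s flip (m + 1)) := by
  have hP : (s + m) / 8 < 8 := by omega
  have hj : pvPhi flip ((s + m) / 8) < 8 := by unfold pvPhi; split <;> omega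
  have hphij : pvPhi flip (pvPhi flip ((s + m) / 8)) = (s + m) / 8 := by
    unfold pvPhi; split <;> omega
  have h2m : (0:Int) < 2 ^ m := by positivity
  have hx0 : 0 ≤ (v % 2 ^ m) * 2 ^ s :=
    mul_nonneg (Int.emod_nonneg v (ne_of_gt h2m)) (by positivity)
  have hxlt : (v % 2 ^ m) * 2 ^ s < 2 ^ (s + m) := by
    calc (v % 2 ^ m) * 2 ^ s < 2 ^ m * 2 ^ s :=
          mul_lt_mul_of_pos_right (Int.emod_lt_of_pos v h2m) (by positivity)
      _ = 2 ^ (s + m) := by rw [← pow_add]; ring_nf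
  have hb : v / 2 ^ m % 2 = 0 ∨ v / 2 ^ m % 2 = 1 := Int.emod_two_eq_zero_or_one _
  have hb0 : 0 ≤ v / 2 ^ m % 2 := by rcases hb with hb | hb <;> omega
  have hb1 : v / 2 ^ m % 2 ≤ 1 := by rcases hb with hb | hb <;> omega
  have hx' : (v % 2 ^ (m + 1)) * 2 ^ s
      = (v % 2 ^ m) * 2 ^ s + (v / 2 ^ m % 2) * 2 ^ (s + m) := by
    rw [pv_emod_succ_pow, pow_add]; ring
  unfold pvStep
  have hget : ((List.range 8).map (pvByte v s flip m)).getD (pvPhi flip ((s + m) / 8)) 0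
      = pvByte v s flip m (pvPhi flip ((s + m) / 8)) := by
    rw [List.getD_eq_getElem?_getD]
    simp [hj]
  rw [hget]
  apply List.ext_getElem
  · simp
  intro k hk1 hk2
  simp only [List.length_map, List.length_range] at hk2
  rw [List.getElem_set]
  simp only [List.getElem_map, List.getElem_range]
  by_cases hkj : pvPhi flip ((s + m) / 8) = k
  · rw [if_pos hkj]
    subst hkj
    have hcr : 8 * ((s + m) / 8) + (s + m) % 8 = s + m := Nat.div_add_mod _ 8
    set c := 8 * ((s + m) / 8) with hc
    set r := (s + m) % 8 with hr
    have hrlt : r < 8 := Nat.mod_lt _ (by norm_num)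
    have h2c : (0:Int) < 2 ^ c := by positivity
    have hsplit : (2:Int) ^ (s + m) = 2 ^ r * 2 ^ c := by
      rw [← pow_add]; congr 1; omega
    have hold : (v % 2 ^ m) * 2 ^ s / 2 ^ c < 2 ^ r := by
      rw [Int.ediv_lt_iff_lt_mul h2c, ← hsplit]; exact hxlt
    have hold0 : 0 ≤ (v % 2 ^ m) * 2 ^ s / 2 ^ c := Int.ediv_nonneg hx0 (by positivity)
    have hrle : (2:Int) ^ r ≤ 2 ^ 7 := pow_le_pow_right₀ (by norm_num) (by omega)
    have hLHS : pvByte v s flip m (pvPhi flip ((s + m) / 8))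
        = (v % 2 ^ m) * 2 ^ s / 2 ^ c := by
      unfold pvByte
      rw [hphij, ← hc]
      exact Int.emod_eq_of_lt hold0 (by omega)
    have hRHS : pvByte v s flip (m + 1) (pvPhi flip ((s + m) / 8))
        = (v % 2 ^ m) * 2 ^ s / 2 ^ c + (v / 2 ^ m % 2) * 2 ^ r := by
      unfold pvByte
      rw [hphij, ← hc, hx', hsplit]
      have harr : (v % 2 ^ m) * 2 ^ s + v / 2 ^ m % 2 * (2 ^ r * 2 ^ c)
          = (v % 2 ^ m) * 2 ^ s + (v / 2 ^ m % 2 * 2 ^ r) * 2 ^ c := by ring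
      rw [harr, Int.add_mul_ediv_right _ _ (ne_of_gt h2c)]
      have hbr : v / 2 ^ m % 2 * 2 ^ r ≤ 2 ^ r := by nlinarith [le_of_lt (show (0:Int) < 2 ^ r by positivity)]
      have hbr0 : 0 ≤ v / 2 ^ m % 2 * 2 ^ r := mul_nonneg hb0 (by positivity)
      exact Int.emod_eq_of_lt (by omega) (by omega)
    rw [hLHS, hRHS, pv_bor_lt r hold0 hold hb]
  · rw [if_neg hkj]
    have hkP : pvPhi flip k ≠ (s + m) / 8 := by
      intro hcon
      apply hkj
      have hinv : pvPhi flip (pvPhi flip k) = k := by unfold pvPhi; split <;> omega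
      rw [← hcon, hinv]
    have goal : pvByte v s flip (m + 1) k = pvByte v s flip m k := by
      unfold pvByte
      rw [hx']
      set c := 8 * pvPhi flip k with hc
      have h2c : (0:Int) < 2 ^ c := by positivity
      rcases Nat.lt_or_ge (pvPhi flip k) ((s + m) / 8) with hlt | hge
      · -- this byte lies strictly below the new bit: the added term is a multiple of 2^(c+8)
        have hcp : c + 8 ≤ s + m := by
          have := Nat.div_add_mod (s + m) 8
          omega
        have hsplit : (2:Int) ^ (s + m) = 2 ^ (s + m - c - 8) * 2 ^ 8 * 2 ^ c := by
          rw [← pow_add, ← pow_add]; congr 1; omega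
        rw [hsplit]
        have harr : (v % 2 ^ m) * 2 ^ s + v / 2 ^ m % 2 * (2 ^ (s + m - c - 8) * 2 ^ 8 * 2 ^ c)
            = (v % 2 ^ m) * 2 ^ s + (v / 2 ^ m % 2 * (2 ^ (s + m - c - 8) * 2 ^ 8)) * 2 ^ c := by
          ring
        rw [harr, Int.add_mul_ediv_right _ _ (ne_of_gt h2c)]
        have harr2 : (v % 2 ^ m) * 2 ^ s / 2 ^ c + v / 2 ^ m % 2 * (2 ^ (s + m - c - 8) * 2 ^ 8)
            = (v % 2 ^ m) * 2 ^ s / 2 ^ c + 256 * (v / 2 ^ m % 2 * 2 ^ (s + m - c - 8)) := by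
          norm_num; ring
        rw [harr2, Int.add_mul_emod_self_left]
      · -- this byte lies above every placed bit: both sides are 0
        have hcp : s + m + 1 ≤ c := by
          have := Nat.div_add_mod (s + m) 8
          have : (s + m) / 8 < pvPhi flip k := lt_of_le_of_ne hge (Ne.symm hkP)
          omega
        have hble : (2:Int) ^ (s + m + 1) ≤ 2 ^ c := pow_le_pow_right₀ (by norm_num) hcp
        have h1 : (v % 2 ^ m) * 2 ^ s / 2 ^ c = 0 := by
          apply Int.ediv_eq_zero_of_lt hx0
          calc (v % 2 ^ m) * 2 ^ s < 2 ^ (s + m) := hxlt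
            _ ≤ 2 ^ c := pow_le_pow_right₀ (by norm_num) (by omega)
        have hsum0 : 0 ≤ (v % 2 ^ m) * 2 ^ s + v / 2 ^ m % 2 * 2 ^ (s + m) :=
          add_nonneg hx0 (mul_nonneg hb0 (by positivity))
        have hbbound : v / 2 ^ m % 2 * 2 ^ (s + m) ≤ 2 ^ (s + m) := by
          nlinarith [le_of_lt (show (0:Int) < 2 ^ (s + m) by positivity)]
        have h2' : ((v % 2 ^ m) * 2 ^ s + v / 2 ^ m % 2 * 2 ^ (s + m)) / 2 ^ c = 0 := by
          apply Int.ediv_eq_zero_of_lt hsum0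
          calc (v % 2 ^ m) * 2 ^ s + v / 2 ^ m % 2 * 2 ^ (s + m)
              < 2 ^ (s + m) + 2 ^ (s + m) := by omega
            _ = 2 ^ (s + m + 1) := by ring
            _ ≤ 2 ^ c := hble
        rw [h1, h2']
    exact goal.symm

theorem pv_inv (v : Int) (s : Nat) (flip : Bool) (n : Nat) (h : s + n ≤ 64) :
    (List.range n).foldl (pvStep v s flip) [0, 0, 0, 0, 0, 0, 0, 0]
      = (List.range 8).map (pvByte v s flip n) := by
  induction n with
  | zero =>
    simp [pvByte, List.range_succ]
  | succ m ih =>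
    rw [List.range_succ, List.foldl_append, ih (by omega), List.foldl_cons, List.foldl_nil,
      pv_step_formula v s m flip (by omega)]

theorem pv_foldl_id {α β : Type} (l : List α) (init : β) :
    l.foldl (fun d _ => d) init = init := by
  induction l generalizing init with
  | nil => rfl
  | cons x xs ih => exact ih init


theorem pv_foldA0 (v : Int) (sB sb : Int) (s : Nat) (n : Nat) (init : List Int)
    (hs : (s : Int) = 8 * (7 - sB) + sb) (hn64 : s + n ≤ 64) :
    (List.range n).foldl (fun (data : List Int) (k : Nat) =>
      PySem.List.pySetD data (sB - PySem.Int.floordiv (sb + (k : Int)) 8)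
        (PySem.Int.bor (PySem.List.pyGetD data (sB - PySem.Int.floordiv (sb + (k : Int)) 8) 0)
          ((PySem.Int.band (v >>> ((k : Int)).toNat) 1) <<< (PySem.Int.mod (sb + (k : Int)) 8).toNat))) init
      = (List.range n).foldl (pvStep v s true) init := by
  apply PySem.List.foldl_congr_mem
  intro acc i hi
  rw [List.mem_range] at hi
  rw [PySem.Int.floordiv_eq_ediv_of_pos (by norm_num), PySem.Int.mod_eq_emod_of_pos (by norm_num)]
  have hidx : sB - (sb + (i : Int)) / 8 = ((pvPhi true ((s + i) / 8) : Nat) : Int) := by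
    rw [show pvPhi true ((s + i) / 8) = 7 - (s + i) / 8 from rfl]
    omega
  have hmod8 : (sb + (i : Int)) % 8 = (((s + i) % 8 : Nat) : Int) := by omega
  rw [hidx, hmod8, PySem.List.pySetD_natCast, PySem.List.pyGetD_natCast,
    Int.toNat_natCast, Int.toNat_natCast, Int.shiftRight_eq_div_pow, pv_band_one,
    Int.shiftLeft_eq]
  unfold pvStep
  push_cast
  rfl

theorem pv_foldA1 (v : Int) (sB sb : Int) (s : Nat) (n : Nat) (init : List Int)
    (hs : (s : Int) = 8 * sB + sb) :
    (List.range n).foldl (fun (data : List Int) (k : Nat) =>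
      PySem.List.pySetD data (sB + PySem.Int.floordiv (sb + (k : Int)) 8)
        (PySem.Int.bor (PySem.List.pyGetD data (sB + PySem.Int.floordiv (sb + (k : Int)) 8) 0)
          ((PySem.Int.band (v >>> ((k : Int)).toNat) 1) <<< (PySem.Int.mod (sb + (k : Int)) 8).toNat))) init
      = (List.range n).foldl (pvStep v s false) init := by
  apply PySem.List.foldl_congr_mem
  intro acc i hi
  rw [List.mem_range] at hi
  rw [PySem.Int.floordiv_eq_ediv_of_pos (by norm_num), PySem.Int.mod_eq_emod_of_pos (by norm_num)]
  have hidx : sB + (sb + (i : Int)) / 8 = ((pvPhi false ((s + i) / 8) : Nat) : Int) := by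
    rw [show pvPhi false ((s + i) / 8) = (s + i) / 8 from rfl]
    omega
  have hmod8 : (sb + (i : Int)) % 8 = (((s + i) % 8 : Nat) : Int) := by omega
  rw [hidx, hmod8, PySem.List.pySetD_natCast, PySem.List.pyGetD_natCast,
    Int.toNat_natCast, Int.toNat_natCast, Int.shiftRight_eq_div_pow, pv_band_one,
    Int.shiftLeft_eq]
  unfold pvStep
  push_cast
  rfl

-- ===== VERDICT (by name: the statement is the Claim_ definition above) =====
theorem calc_signaVal_spec : Claim_equal_calc_signaVal := by
  intro sv sB sb sL bo hDom hPre
  unfold Spec_calc_signaVal calc_signaVal calc_signaVal_alt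
  dsimp only
  by_cases hmain : 0 < sL ∧ (bo = 0 ∨ bo = 1)
  · obtain ⟨hsl, hbo⟩ := hmain
    obtain ⟨hparse, hbnd⟩ := hPre ⟨hsl, hbo⟩
    obtain ⟨v, hv⟩ := Option.isSome_iff_exists.mp hparse
    rw [if_pos (⟨hsl, hbo⟩ : 0 < sL ∧ (bo = 0 ∨ bo = 1)), hv]
    simp only [Option.getD_some]
    set n := sL.toNat with hn
    have hsln : sL = (n : Int) := by omega
    rcases hbo with rfl | rfl
    · -- byteorder = 0 (Motorola): flip = true
      rw [if_neg (by norm_num : ¬((0:Int) = 1))] at hbnd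
      obtain ⟨hb1, hb2⟩ := hbnd
      rw [PySem.Int.floordiv_eq_ediv_of_pos (by norm_num)] at hb1 hb2
      set s : Nat := (8 * (7 - sB) + sb).toNat with hsdef
      have hs : (s : Int) = 8 * (7 - sB) + sb := by omega
      have hn64 : s + n ≤ 64 := by omega
      rw [hsln, PySem.List.pyRange_zero_nat]
      simp only [List.foldl_map, show ((0:Int) = 1) = False by norm_num, if_true, if_false]
      rw [pv_foldA0 v sB sb s n _ hs hn64, pv_inv v s true n hn64]
      congr 1
      apply List.map_congr_left
      intro k hk
      rw [List.mem_range] at hk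
      rw [Int.shiftLeft_eq, Int.shiftLeft_eq, one_mul, pv_band_two_pow_sub_one,
        Int.shiftRight_eq_div_pow, pv_band_255]
      rw [show pvByte v s true n k = (v % 2 ^ n) * 2 ^ s / 2 ^ (8 * (7 - k)) % 256 from rfl]
      push_cast
      rfl
    · -- byteorder = 1 (Intel): flip = false
      rw [if_pos rfl] at hbnd
      obtain ⟨hb1, hb2⟩ := hbnd
      rw [PySem.Int.floordiv_eq_ediv_of_pos (by norm_num)] at hb1 hb2
      set s : Nat := (8 * sB + sb).toNat with hsdef
      have hs : (s : Int) = 8 * sB + sb := by omega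
      have hn64 : s + n ≤ 64 := by omega
      rw [hsln, PySem.List.pyRange_zero_nat]
      simp only [List.foldl_map, show ((1:Int) = 0) = False by norm_num, if_true, if_false]
      rw [pv_foldA1 v sB sb s n _ hs, pv_inv v s false n hn64]
      congr 1
      apply List.map_congr_left
      intro k hk
      rw [List.mem_range] at hk
      rw [Int.shiftLeft_eq, Int.shiftLeft_eq, one_mul, pv_band_two_pow_sub_one,
        Int.shiftRight_eq_div_pow, pv_band_255]
      rw [show pvByte v s false n k = (v % 2 ^ n) * 2 ^ s / 2 ^ (8 * k) % 256 from rfl]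
      push_cast
      rfl
  · rw [if_neg hmain]
    rcases not_and_or.mp hmain with hsl | hbo
    · have hnil : PySem.List.pyRange 0 sL 1 = [] := by
        rw [PySem.List.pyRange_zero]
        have h0 : sL.toNat = 0 := by omega
        rw [h0]
        rfl
      rw [hnil]
      rfl
    · obtain ⟨h0, h1⟩ := not_or.mp hbo
      simp only [if_neg h0, if_neg h1]
      rw [pv_foldl_id]
      rfl
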